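-- pv_equiv track=rewrite | github.com/RanjitMane7/Python-Practice-Codes | Correct_Path.py | counter_y
-- ===== SOURCE A (Python) =====
-- def counter_y(sample) :
--     county = 0
--     for i in sample :
--         if i == 'd' :
--             county += 1
--         elif i == 'u' :
--             county -= 1
--     return county
-- ===== SOURCE B (Python) =====
-- def counter_y(sample):
--     tally = {}
--     for ch in sample:
--         tally[ch] = tally.get(ch, 0) + 1
--     return tally.get('d', 0) - tally.get('u', 0)
-- ===== Notes on version B (the rewrite author's own statement) =====
-- stated objective: alternative
-- what changed: B builds a full character-frequency dict in one pass (a hand-rolled Counter) and returns tally['d'] minus tally['u'] from two lookups, instead of A's single branching accumulator.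
import Mathlib
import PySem

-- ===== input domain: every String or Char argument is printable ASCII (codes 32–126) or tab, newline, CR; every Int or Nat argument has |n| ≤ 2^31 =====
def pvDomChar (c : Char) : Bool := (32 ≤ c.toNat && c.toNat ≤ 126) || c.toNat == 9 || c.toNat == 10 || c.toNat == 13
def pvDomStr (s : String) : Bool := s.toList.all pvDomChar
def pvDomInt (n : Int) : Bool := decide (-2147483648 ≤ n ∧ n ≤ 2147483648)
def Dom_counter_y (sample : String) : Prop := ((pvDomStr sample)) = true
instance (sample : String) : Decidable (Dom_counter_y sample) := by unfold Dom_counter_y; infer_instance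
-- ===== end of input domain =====

-- B replaces A's branching accumulator with a one-pass character-frequency dict and two final lookups (alternative decomposition, same cost).
-- ===== PORT A =====
-- A: single pass with a branching accumulator
def counter_y (sample : String) : Int :=
  sample.toList.foldl
    (fun county i => if i == 'd' then county + 1 else if i == 'u' then county - 1 else county)
    (0 : Int)

-- ===== PORT B =====
-- B: build a full character-frequency dict in one pass, then subtract two lookups
def counter_y_alt (sample : String) : Int :=
  let tally : PySem.Dict Char Int :=
    sample.toList.foldl (fun d ch => d.insert ch (d.getD ch 0 + 1)) PySem.Dict.empty
  tally.getD 'd' 0 - tally.getD 'u' 0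

-- ===== PRECONDITION & SPEC =====
def Spec_counter_y (sample : String) (out : Int) : Prop := out = counter_y_alt sample
instance (sample : String) (out : Int) : Decidable (Spec_counter_y sample out) := by unfold Spec_counter_y; infer_instance

-- ===== CLAIM (what is proved, stated in full; the proofs are below) =====
def Claim_equal_counter_y : Prop := ∀ (sample : String), Dom_counter_y sample → Spec_counter_y sample (counter_y sample)

-- ===== LEMMAS AND PROOFS =====

-- ===== VERDICT (by name: the statement is the Claim_ definition above) =====
-- A's loop computes count 'd' minus count 'u' (shifted by the accumulator)
theorem counter_y_fold_eq (l : List Char) (a : Int) :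
    l.foldl (fun county i => if i == 'd' then county + 1 else if i == 'u' then county - 1 else county) a
      = a + (l.count 'd' : Int) - (l.count 'u' : Int) := by
  induction l generalizing a with
  | nil => simp
  | cons x xs ih =>
    simp only [List.foldl_cons, List.count_cons, ih]
    by_cases h1 : x = 'd' <;> by_cases h2 : x = 'u' <;> simp [h1, h2] <;> ring

-- ===== VERDICT (by name: the statement is the Claim_ definition above) =====
theorem counter_y_spec : Claim_equal_counter_y := by
  intro sample _
  unfold Spec_counter_y counter_y counter_y_alt
  rw [counter_y_fold_eq]
  simp [PySem.Dict.getD_foldl_insert_add_one]
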